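-- pv_equiv track=rewrite | github.com/dim-4/ARC | bin/src/utils.py | get_objects_by_color
-- ===== SOURCE A (Python) =====
-- def empty_grid(x, y, fill_value=None):
--     return [[fill_value for _ in range(x)] for _ in range(y)]
--
-- def get_w(grid):
--     return len(grid[0])
--
-- def get_h(grid):
--     return len(grid)
--
-- def can_go(grid, x, y):
--     try:
--         el = grid[y][x]
--         return True
--     except: pass
--     return False
--
-- def get_objects_by_color(grid):
--     """ generates list of objects defined by adjacent colors """
--     def traverse(x, y, obj:list):
--         obj.append((x, y, {"color": grid[y][x]}))
--         covered[y][x] = True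
--         for xop in [1, 0, -1]:
--             for yop in [1, 0, -1]:
--                 if xop == 0 and yop == 0: continue
--                 if can_go(grid, x+xop, y+yop) \
--                     and grid[y][x] == grid[y+yop][x+xop] \
--                         and not covered[y+yop][x+xop]:
--                             traverse(x+xop, y+yop, obj)
--
--     covered = empty_grid(get_w(grid), get_h(grid), False)
--     objects = []
--     for y in range(len(grid)):
--         for x in range(len(grid[y])):
--             if covered[y][x]: continue
--             obj = []
--             traverse(x, y, obj)
--             objects.append(obj)
--
--     return objects
-- ===== SOURCE B (Python) =====
-- def get_objects_by_color(grid):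
--     """ generates list of objects defined by adjacent colors (iterative DFS
--     with an explicit stack instead of recursion) """
--
--     def cell(x, y):
--         try:
--             return grid[y][x]
--         except IndexError:
--             return None
--
--     covered = [[False] * len(grid[0]) for _ in grid]
--     objects = []
--     for y in range(len(grid)):
--         for x in range(len(grid[y])):
--             if covered[y][x]:
--                 continue
--             obj = []
--             stack = [(x, y)]
--             while stack:
--                 cx, cy = stack.pop()
--                 if covered[cy][cx]:
--                     continue
--                 color = grid[cy][cx]
--                 obj.append((cx, cy, {"color": color}))
--                 covered[cy][cx] = True
--                 for dx, dy in ((-1, -1), (-1, 0), (-1, 1), (0, -1),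
--                                (0, 1), (1, -1), (1, 0), (1, 1)):
--                     if cell(cx + dx, cy + dy) == color:
--                         stack.append((cx + dx, cy + dy))
--             objects.append(obj)
--     return objects
-- ===== Notes on version B (the rewrite author's own statement) =====
-- stated objective: alternative
-- what changed: The recursive inner traverse (deep pre-order DFS via the Python call stack) is replaced by an iterative DFS over an explicit stack of (x,y) coordinates with a single cell accessor: neighbours whose cell equals the current colour are pushed in reverse offset order so they pop in scan order, and covered is re-checked on pop; Pre_ excludes only inputs where A raises (empty grid, or a row longer than row 0).
import Mathlib
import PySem

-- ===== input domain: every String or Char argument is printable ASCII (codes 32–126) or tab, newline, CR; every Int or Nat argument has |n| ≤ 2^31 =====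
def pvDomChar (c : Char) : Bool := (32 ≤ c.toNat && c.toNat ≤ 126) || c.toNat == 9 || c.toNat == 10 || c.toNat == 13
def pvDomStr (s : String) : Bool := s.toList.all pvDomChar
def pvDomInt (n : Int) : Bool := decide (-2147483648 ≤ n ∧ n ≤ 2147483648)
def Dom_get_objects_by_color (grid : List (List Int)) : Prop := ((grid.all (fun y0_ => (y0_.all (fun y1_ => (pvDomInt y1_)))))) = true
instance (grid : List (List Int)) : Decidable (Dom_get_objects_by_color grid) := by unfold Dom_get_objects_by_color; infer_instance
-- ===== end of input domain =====

-- B replaces A's recursive inner `traverse` with an iterative DFS over an explicit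
-- stack of coordinates (neighbours pushed in reverse offset order, covered re-checked
-- on pop, one try/except cell accessor); objective: alternative.

-- ===== PORT A =====
-- Shared primitives: raw Python indexing with negative wraparound (PySem.List.pyGet?).
-- The `.getD` defaults below are unreachable at every call the ports make under Pre_
-- (indices are validated by `can_go` / `cell` / the loop bounds; Python would raise
-- outside Pre_).
abbrev pvObj : Type := List (Int × Int × List (String × Int))
abbrev pvState : Type := List (List Bool) × pvObj

def pvCanGo (grid : List (List Int)) (x y : Int) : Bool :=
  ((PySem.List.pyGet? grid y).bind (fun r => PySem.List.pyGet? r x)).isSome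

def pvColor (grid : List (List Int)) (x y : Int) : Int :=
  (PySem.List.pyGet? ((PySem.List.pyGet? grid y).getD []) x).getD 0

def pvCovered (cov : List (List Bool)) (x y : Int) : Bool :=
  (PySem.List.pyGet? ((PySem.List.pyGet? cov y).getD []) x).getD false

-- covered[y][x] = True  (no-op out of range; in range at every call under Pre_)
def pvMark (cov : List (List Bool)) (x y : Int) : List (List Bool) :=
  PySem.List.pySetD cov y (PySem.List.pySetD ((PySem.List.pyGet? cov y).getD []) x true)

-- obj.append((x, y, {"color": grid[y][x]})); covered[y][x] = True
def pvVisit (grid : List (List Int)) (x y : Int) (s : pvState) : pvState :=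
  (pvMark s.1 x y, s.2 ++ [(x, y, [("color", pvColor grid x y)])])

-- the (xop, yop) pairs of A's two nested `for` loops, with (0, 0) skipped
def pvOps : List (Int × Int) := [(1,1),(1,0),(1,-1),(0,1),(0,-1),(-1,1),(-1,0),(-1,-1)]

-- A's `traverse` after its first line: the loop over neighbour offsets; a guarded offset
-- recurses (visit the neighbour, then its own offset loop with pvOps).  `f` is a fuel
-- totality guard charged once per visit and threaded left-to-right (leftover returned);
-- it never runs out with the initial fuel get_objects_by_color supplies under Pre_.
def pvTravList (grid : List (List Int)) : (f : Nat) → Int → Int → (ops : List (Int × Int)) → pvState → {r : pvState × Nat // r.2 ≤ f}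
  | f, _, _, [], s => ⟨(s, f), Nat.le_refl f⟩
  | f, x, y, (xop, yop) :: ops, s =>
    if pvCanGo grid (x + xop) (y + yop) && (pvColor grid x y == pvColor grid (x + xop) (y + yop)) && !(pvCovered s.1 (x + xop) (y + yop)) then
      match f with
      | 0 => ⟨(s, 0), Nat.le_refl 0⟩
      | f' + 1 =>
        let r := pvTravList grid f' (x + xop) (y + yop) pvOps (pvVisit grid (x + xop) (y + yop) s)
        let r2 := pvTravList grid r.val.2 x y ops r.val.1
        ⟨r2.val, Nat.le_succ_of_le (Nat.le_trans r2.property r.property)⟩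
    else pvTravList grid f x y ops s
  termination_by f _ _ ops _ => (f, ops.length)
  decreasing_by
  · exact Prod.Lex.left _ _ (Nat.lt_succ_of_le (Nat.le_refl f'))
  · exact Prod.Lex.left _ _ (Nat.lt_succ_of_le r.property)
  · exact Prod.Lex.right _ (Nat.lt_succ_of_le (Nat.le_refl ops.length))

-- A's traverse(x, y, obj)
def pvTraverse (grid : List (List Int)) (f : Nat) (x y : Int) (s : pvState) : pvState × Nat :=
  match f with
  | 0 => (s, 0)
  | f' + 1 => (pvTravList grid f' x y pvOps (pvVisit grid x y s)).val

-- len(grid[y])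
def pvRowLen (grid : List (List Int)) (y : Int) : Nat := ((PySem.List.pyGet? grid y).getD []).length

def get_objects_by_color (grid : List (List Int)) : List (List (Int × Int × (List (String × Int)))) :=
  let h := grid.length
  let w := pvRowLen grid 0
  let cov0 : List (List Bool) := List.replicate h (List.replicate w false)
  let fuel := h * w + 1   -- totality guard: ≥ 1 + number of cells ≥ 1 + possible visits
  ((List.range h).foldl (fun st y =>
      (List.range (pvRowLen grid (y : Int))).foldl (fun st x =>
        if pvCovered st.1 (x : Int) (y : Int) then st
        else
          let r := pvTraverse grid fuel (x : Int) (y : Int) (st.1, ([] : pvObj))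
          (r.1.1, st.2 ++ [r.1.2])) st)
    ((cov0, []) : List (List Bool) × List pvObj)).2

-- ===== PORT B =====
-- B's `cell(x, y)`: grid[y][x], or None on IndexError
def pvCell (grid : List (List Int)) (x y : Int) : Option Int :=
  (PySem.List.pyGet? grid y).bind (fun r => PySem.List.pyGet? r x)

-- B's neighbour-offset tuple, iterated in this order and each valid one pushed
def pvRevOps : List (Int × Int) := [(-1,-1),(-1,0),(-1,1),(0,-1),(0,1),(1,-1),(1,0),(1,1)]

-- the `for dx, dy in (…): if cell(...) == color: stack.append(...)` loop.  The Lean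
-- list is the stack with its HEAD as the top, so `stack.append` is prepending.
def pvPush (grid : List (List Int)) (color cx cy : Int) (stack : List (Int × Int)) : List (Int × Int) :=
  pvRevOps.foldl (fun st d =>
    if pvCell grid (cx + d.1) (cy + d.2) = some color then (cx + d.1, cy + d.2) :: st else st) stack

-- B's while-loop.  `stack.pop()` is taking the head.  `f` is the same fuel totality
-- guard as in port A, charged once per visit.
def pvLoop (grid : List (List Int)) : Nat → List (Int × Int) → pvState → pvState
  | _, [], s => s
  | f, (x, y) :: rest, s =>
    if pvCovered s.1 x y then pvLoop grid f rest s
    else match f with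
      | 0 => s
      | f' + 1 => pvLoop grid f' (pvPush grid (pvColor grid x y) x y rest) (pvVisit grid x y s)
  termination_by f stack _ => (f, stack.length)
  decreasing_by
  · exact Prod.Lex.right _ (Nat.lt_succ_of_le (Nat.le_refl rest.length))
  · exact Prod.Lex.left _ _ (Nat.lt_succ_of_le (Nat.le_refl f'))

def get_objects_by_color_alt (grid : List (List Int)) : List (List (Int × Int × (List (String × Int)))) :=
  let h := grid.length
  let w := pvRowLen grid 0
  let cov0 : List (List Bool) := List.replicate h (List.replicate w false)
  let fuel := h * w + 1
  ((List.range h).foldl (fun st y =>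
      (List.range (pvRowLen grid (y : Int))).foldl (fun st x =>
        if pvCovered st.1 (x : Int) (y : Int) then st
        else
          let r := pvLoop grid fuel [((x : Int), (y : Int))] (st.1, ([] : pvObj))
          (r.1, st.2 ++ [r.2])) st)
    ((cov0, []) : List (List Bool) × List pvObj)).2

-- ===== PRECONDITION & SPEC =====
-- Pre_ excludes exactly the inputs on which Python A raises: the empty grid (len(grid[0])
-- is an IndexError) and grids with a row longer than row 0 (covered[y][x] is an IndexError
-- there, since `covered` has the width of row 0).
def Pre_get_objects_by_color (grid : List (List Int)) : Prop :=
  grid ≠ [] ∧ ∀ row ∈ grid, row.length ≤ ((PySem.List.pyGet? grid 0).getD []).length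
instance (grid : List (List Int)) : Decidable (Pre_get_objects_by_color grid) := by unfold Pre_get_objects_by_color; infer_instance

def pvWitness_get_objects_by_color : List (List Int) := [[1, 1, 2], [1, 2, 2]]

def Spec_get_objects_by_color (grid : List (List Int)) (out : List (List (Int × Int × (List (String × Int))))) : Prop := out = get_objects_by_color_alt grid
instance (grid : List (List Int)) (out : List (List (Int × Int × (List (String × Int))))) : Decidable (Spec_get_objects_by_color grid out) := by unfold Spec_get_objects_by_color; infer_instance

-- ===== CLAIM (what is proved, stated in full; the proofs are below) =====
def Claim_equal_get_objects_by_color : Prop := ∀ (grid : List (List Int)), Dom_get_objects_by_color grid → Pre_get_objects_by_color grid → Spec_get_objects_by_color grid (get_objects_by_color grid)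

-- ===== LEMMAS AND PROOFS =====

-- the candidate a single offset contributes, as an Option (none = not pushed)
def pvCand (grid : List (List Int)) (c nx ny : Int) : Option (Int × Int) :=
  if pvCell grid nx ny = some c then some (nx, ny) else none

-- B's push loop prepends exactly the filterMap of pvCand over the reversed offsets
lemma foldl_push_eq (grid : List (List Int)) (c cx cy : Int) : ∀ (L : List (Int × Int)) (stack : List (Int × Int)),
    L.foldl (fun st d => if pvCell grid (cx + d.1) (cy + d.2) = some c then (cx + d.1, cy + d.2) :: st else st) stack
      = L.reverse.filterMap (fun p => pvCand grid c (cx + p.1) (cy + p.2)) ++ stack := by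
  intro L
  induction L with
  | nil => intro stack; simp
  | cons d L ih =>
    intro stack
    rw [List.foldl_cons, ih, List.reverse_cons, List.filterMap_append, List.append_assoc]
    congr 1
    simp only [List.filterMap_cons, List.filterMap_nil, pvCand]
    split_ifs <;> simp

lemma pvPush_eq (grid : List (List Int)) (c cx cy : Int) (stack : List (Int × Int)) :
    pvPush grid c cx cy stack
      = pvOps.filterMap (fun p => pvCand grid c (cx + p.1) (cy + p.2)) ++ stack := by
  rw [pvPush, foldl_push_eq]
  rfl

-- B's cell-equality test is A's can_go-and-colour guard
lemma pvCand_spec (grid : List (List Int)) (c nx ny : Int) :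
    pvCand grid c nx ny = if pvCanGo grid nx ny && (c == pvColor grid nx ny) then some (nx, ny) else none := by
  unfold pvCand pvCell pvCanGo pvColor
  rcases hrow : PySem.List.pyGet? grid ny with _ | row
  · simp
  · rcases hel : PySem.List.pyGet? row nx with _ | v
    · simp [hel]
    · simp only [hel, Option.bind_some, Option.isSome_some, Option.getD_some, Bool.true_and,
        Option.some.injEq, beq_iff_eq]
      by_cases h : c = v
      · simp [h]
      · simp only [h, if_false]
        rw [if_neg (fun hh => h hh.symm)]

lemma pvLoop_zero (grid : List (List Int)) (stack : List (Int × Int)) (s : pvState) :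
    pvLoop grid 0 stack s = s := by
  induction stack with
  | nil => rw [pvLoop]
  | cons p rest ih =>
    obtain ⟨x, y⟩ := p
    rw [pvLoop]
    split
    · exact ih
    · rfl

-- covered cells are skipped when popped, whatever the fuel
lemma pvLoop_covered (grid : List (List Int)) (f : Nat) (x y : Int) (rest : List (Int × Int)) (s : pvState)
    (h : pvCovered s.1 x y = true) : pvLoop grid f ((x, y) :: rest) s = pvLoop grid f rest s := by
  cases f <;> rw [pvLoop] <;> simp [h]

-- the bridge: running B's stack loop on the candidate list of A's offset loop (plus any
-- remaining stack) is A's offset loop followed by the loop on the remaining stack,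
-- with the identical leftover fuel
lemma pv_bridge (grid : List (List Int)) : ∀ (f : Nat) (ops : List (Int × Int)) (x y : Int) (rest : List (Int × Int)) (s : pvState),
    pvLoop grid f (ops.filterMap (fun p => pvCand grid (pvColor grid x y) (x + p.1) (y + p.2)) ++ rest) s
      = pvLoop grid (pvTravList grid f x y ops s).val.2 rest (pvTravList grid f x y ops s).val.1 := by
  intro f
  induction f using Nat.strong_induction_on with
  | _ f IHf =>
    intro ops
    induction ops with
    | nil =>
      intro x y rest s
      rw [pvTravList.eq_def]
      simp
    | cons p ops IHops =>
      obtain ⟨xop, yop⟩ := p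
      intro x y rest s
      rw [pvTravList.eq_def]
      simp only [List.filterMap_cons]
      rw [pvCand_spec]
      by_cases hg : (pvCanGo grid (x + xop) (y + yop) && (pvColor grid x y == pvColor grid (x + xop) (y + yop))) = true
      · rcases hcov : pvCovered s.1 (x + xop) (y + yop) with _ | _
        · -- uncovered: a visit happens
          simp only [hg, if_true, Bool.not_false, Bool.and_true]
          cases f with
          | zero =>
            simp only [pvLoop_zero]
          | succ f' =>
            rw [List.cons_append, pvLoop]
            simp only [hcov, Bool.false_eq_true, if_false]
            rw [show pvPush grid (pvColor grid (x + xop) (y + yop)) (x + xop) (y + yop)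
                  (List.filterMap (fun p => pvCand grid (pvColor grid x y) (x + p.1) (y + p.2)) ops ++ rest)
                = pvOps.filterMap (fun p => pvCand grid (pvColor grid (x + xop) (y + yop)) ((x + xop) + p.1) ((y + yop) + p.2))
                  ++ (List.filterMap (fun p => pvCand grid (pvColor grid x y) (x + p.1) (y + p.2)) ops ++ rest)
                from pvPush_eq ..]
            rw [IHf f' (Nat.lt_succ_self f') pvOps (x + xop) (y + yop)
                  (List.filterMap (fun p => pvCand grid (pvColor grid x y) (x + p.1) (y + p.2)) ops ++ rest)
                  (pvVisit grid (x + xop) (y + yop) s)]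
            exact IHf (pvTravList grid f' (x + xop) (y + yop) pvOps (pvVisit grid (x + xop) (y + yop) s)).val.2
              (Nat.lt_succ_of_le (pvTravList grid f' (x + xop) (y + yop) pvOps (pvVisit grid (x + xop) (y + yop) s)).property)
              ops x y rest _
        · -- covered on pop
          simp only [hg, if_true, Bool.not_true, Bool.and_false, Bool.false_eq_true, if_false]
          rw [List.cons_append, pvLoop_covered grid f (x + xop) (y + yop) _ s hcov]
          exact IHops x y rest s
      · simp only [Bool.not_eq_true] at hg
        simp only [hg, Bool.false_and, Bool.false_eq_true, if_false]
        exact IHops x y rest s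

-- per start cell: B's stack run from an uncovered cell is A's traverse
lemma pv_start (grid : List (List Int)) (f : Nat) (x y : Int) (s : pvState)
    (h : pvCovered s.1 x y = false) :
    pvLoop grid f [(x, y)] s = (pvTraverse grid f x y s).1 := by
  cases f with
  | zero =>
    rw [pvLoop]
    simp [h, pvTraverse]
  | succ f' =>
    rw [pvLoop]
    simp only [h, Bool.false_eq_true, if_false]
    rw [show pvPush grid (pvColor grid x y) x y ([] : List (Int × Int))
          = pvOps.filterMap (fun p => pvCand grid (pvColor grid x y) (x + p.1) (y + p.2)) ++ []
        from pvPush_eq ..]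
    rw [pv_bridge grid f' pvOps x y [] (pvVisit grid x y s)]
    rw [pvLoop]
    rfl

-- each start cell is handled identically by the two outer loops
lemma pv_cell (grid : List (List Int)) (fuel : Nat) (x y : Int) (st : List (List Bool) × List pvObj) :
    (if pvCovered st.1 x y then st
     else
       let r := pvTraverse grid fuel x y (st.1, ([] : pvObj))
       (r.1.1, st.2 ++ [r.1.2]))
    = (if pvCovered st.1 x y then st
       else
         let r := pvLoop grid fuel [(x, y)] (st.1, ([] : pvObj))
         (r.1, st.2 ++ [r.2])) := by
  by_cases h : pvCovered st.1 x y = true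
  · simp [h]
  · simp only [Bool.not_eq_true] at h
    simp only [h, Bool.false_eq_true, if_false]
    rw [pv_start grid fuel x y (st.1, ([] : pvObj)) h]

-- ===== VERDICT (by name: the statement is the Claim_ definition above) =====
theorem get_objects_by_color_spec : Claim_equal_get_objects_by_color := by
  intro grid _ _
  show get_objects_by_color grid = get_objects_by_color_alt grid
  simp only [get_objects_by_color, get_objects_by_color_alt]
  congr 1
  congr 1
  funext st y
  congr 1
  funext st' x
  exact pv_cell grid (grid.length * pvRowLen grid 0 + 1) (x : Int) (y : Int) st'
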